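-- pv_equiv track=rewrite | github.com/Codeenk/BugBountyTool | src/modules/integration/external_tools.py | _parse_xsstrike_output
-- ===== SOURCE A (Python) =====
-- from typing import Dict, List, Optional, Callable
--
-- def _parse_xsstrike_output(output: str) -> List[Dict]:
--     """Parse XSStrike output into structured findings."""
--     findings = []
--     current_finding = None
--
--     for line in output.split('\n'):
--         line = line.strip()
--         if not line:
--             continue
--
--         # Look for XSS findings
--         if 'Payload: ' in line:
--             if current_finding:
--                 findings.append(current_finding)
--             current_finding = {
--                 'type': 'xss',
--                 'payload': line.split('Payload: ')[1],
--                 'context': '',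
--                 'url': '',
--                 'severity': 'high'  # XSS is typically high severity
--             }
--         elif current_finding:
--             if 'URL: ' in line:
--                 current_finding['url'] = line.split('URL: ')[1]
--             elif 'Context: ' in line:
--                 current_finding['context'] = line.split('Context: ')[1]
--
--     if current_finding:
--         findings.append(current_finding)
--
--     return findings
-- ===== SOURCE B (Python) =====
-- from typing import Dict, List
--
--
-- def _xss_finding(group: List[str]) -> Dict:
--     """Turn one payload-led group of lines into a finding dict."""
--     url = ''
--     context = ''
--     for line in group[1:]:
--         if 'URL: ' in line:
--             url = line.split('URL: ')[1]
--         elif 'Context: ' in line: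
--             context = line.split('Context: ')[1]
--     return {
--         'type': 'xss',
--         'payload': group[0].split('Payload: ')[1],
--         'context': context,
--         'url': url,
--         'severity': 'high',
--     }
--
--
-- def _parse_xsstrike_output(output: str) -> List[Dict]:
--     """Parse XSStrike output: group stripped non-empty lines at 'Payload: '
--     markers (dropping lines before the first marker), then map groups to findings."""
--     lines = [line for line in (raw.strip() for raw in output.split('\n')) if line]
--     groups: List[List[str]] = []
--     for line in lines:
--         if 'Payload: ' in line:
--             groups.append([line])
--         elif groups:
--             groups[-1] = groups[-1] + [line]
--     return [_xss_finding(g) for g in groups]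
-- ===== Notes on version B (the rewrite author's own statement) =====
-- stated objective: alternative
-- what changed: Replaced A's single stateful pass (a current-finding dict mutated as lines stream by) with a two-phase decomposition: partition the stripped non-empty lines into payload-led groups, then map each group to its finding via a separate helper.
import Mathlib
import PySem

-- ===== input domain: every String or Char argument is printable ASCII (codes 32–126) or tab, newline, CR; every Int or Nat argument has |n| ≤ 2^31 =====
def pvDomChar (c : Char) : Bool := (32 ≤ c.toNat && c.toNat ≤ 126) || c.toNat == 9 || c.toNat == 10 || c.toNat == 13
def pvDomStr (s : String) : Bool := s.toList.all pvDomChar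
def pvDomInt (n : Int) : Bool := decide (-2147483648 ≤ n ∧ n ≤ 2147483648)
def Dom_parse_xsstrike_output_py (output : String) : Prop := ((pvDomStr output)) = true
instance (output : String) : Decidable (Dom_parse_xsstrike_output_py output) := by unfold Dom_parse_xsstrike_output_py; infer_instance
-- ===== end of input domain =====

-- B replaces A's one-pass loop with stateful current-finding by a two-phase decomposition
-- (partition the stripped non-empty lines into payload-led groups, then map each group to a
-- finding); objective: alternative decomposition, same cost.

-- ===== PORT A =====
-- body of A's loop after the strip / empty-line 'continue'
def pvA_line (st : List (PySem.Dict String String) × Option (PySem.Dict String String))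
    (line : String) : List (PySem.Dict String String) × Option (PySem.Dict String String) :=
  if PySem.Str.isIn "Payload: " line then
    let nf : PySem.Dict String String :=
      PySem.Dict.ofList [("type", "xss"),
        ("payload", PySem.List.pyGetD ((PySem.Str.split? line "Payload: ").getD []) 1 ""),
        ("context", ""), ("url", ""), ("severity", "high")]
    match st.2 with
    | some cf => (st.1 ++ [cf], some nf)
    | none    => (st.1, some nf)
  else
    match st.2 with
    | some cf =>
      if PySem.Str.isIn "URL: " line then
        (st.1, some (cf.insert "url" (PySem.List.pyGetD ((PySem.Str.split? line "URL: ").getD []) 1 "")))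
      else if PySem.Str.isIn "Context: " line then
        (st.1, some (cf.insert "context" (PySem.List.pyGetD ((PySem.Str.split? line "Context: ").getD []) 1 "")))
      else st
    | none => st

def pvA_step (st : List (PySem.Dict String String) × Option (PySem.Dict String String))
    (raw : String) : List (PySem.Dict String String) × Option (PySem.Dict String String) :=
  let line := PySem.Str.strip raw
  if line = "" then st else pvA_line st line

def parse_xsstrike_output_py (output : String) : List (List (String × String)) :=
  let st := ((PySem.Str.split? output "\n").getD []).foldl pvA_step ([], none)
  (match st.2 with
   | some cf => st.1 ++ [cf]
   | none    => st.1).map PySem.Dict.items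

-- ===== PORT B =====
-- phase 1: partition lines into payload-led groups (lines before the first marker are dropped)
def pvB_group (gs : List (List String)) (line : String) : List (List String) :=
  if PySem.Str.isIn "Payload: " line then gs ++ [[line]]
  else if gs ≠ [] then gs.dropLast ++ [gs.getLastD [] ++ [line]]
  else gs

-- phase 2, inner scan of _xss_finding: last-wins (url, context) over a group's tail
def pvB_scan (uc : String × String) (line : String) : String × String :=
  if PySem.Str.isIn "URL: " line then
    (PySem.List.pyGetD ((PySem.Str.split? line "URL: ").getD []) 1 "", uc.2)
  else if PySem.Str.isIn "Context: " line then
    (uc.1, PySem.List.pyGetD ((PySem.Str.split? line "Context: ").getD []) 1 "")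
  else uc

-- _xss_finding: one group → one finding (the dict literal, as an association list)
def pvB_finding (g : List String) : List (String × String) :=
  let uc := (PySem.List.slice g (some 1) none).foldl pvB_scan ("", "")
  [("type", "xss"),
   ("payload", PySem.List.pyGetD (((PySem.Str.split? (PySem.List.pyGetD g 0 "") "Payload: ").getD [])) 1 ""),
   ("context", uc.2), ("url", uc.1), ("severity", "high")]

def parse_xsstrike_output_py_alt (output : String) : List (List (String × String)) :=
  let lines := ((((PySem.Str.split? output "\n").getD []).map PySem.Str.strip).filter (fun l => l ≠ ""))
  (lines.foldl pvB_group []).map pvB_finding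

-- ===== PRECONDITION & SPEC =====
def Spec_parse_xsstrike_output_py (output : String) (out : List (List (String × String))) : Prop := out = parse_xsstrike_output_py_alt output
instance (output : String) (out : List (List (String × String))) : Decidable (Spec_parse_xsstrike_output_py output out) := by unfold Spec_parse_xsstrike_output_py; infer_instance

-- ===== CLAIM (what is proved, stated in full; the proofs are below) =====
def Claim_equal_parse_xsstrike_output_py : Prop := ∀ (output : String), Dom_parse_xsstrike_output_py output → Spec_parse_xsstrike_output_py output (parse_xsstrike_output_py output)

-- ===== LEMMAS AND PROOFS =====

-- A's dict value for a (possibly partial) group: pvB_finding's dict, as a PySem.Dict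
def pvFD (g : List String) : PySem.Dict String String :=
  PySem.Dict.mk
    [("type", "xss"),
     ("payload", PySem.List.pyGetD (((PySem.Str.split? (PySem.List.pyGetD g 0 "") "Payload: ").getD [])) 1 ""),
     ("context", ((PySem.List.slice g (some 1) none).foldl pvB_scan ("", "")).2),
     ("url", ((PySem.List.slice g (some 1) none).foldl pvB_scan ("", "")).1),
     ("severity", "high")]

theorem pvFD_items (g : List String) : (pvFD g).items = pvB_finding g := rfl

-- strip-and-skip folding over raw lines = folding over the stripped non-empty lines
theorem pv_foldl_strip_filter {σ : Type} (f : σ → String → σ) (raws : List String) (st : σ) :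
    raws.foldl (fun st r => let line := PySem.Str.strip r; if line = "" then st else f st line) st
      = ((raws.map PySem.Str.strip).filter (fun l => l ≠ "")).foldl f st := by
  induction raws generalizing st with
  | nil => rfl
  | cons r rs ih =>
    simp only [List.foldl_cons, List.map_cons, List.filter_cons]
    by_cases h : PySem.Str.strip r = "" <;> simp [h, ih]

theorem pvFD_singleton (line : String) :
    pvFD [line] =
      PySem.Dict.ofList [("type", "xss"),
        ("payload", PySem.List.pyGetD ((PySem.Str.split? line "Payload: ").getD []) 1 ""),
        ("context", ""), ("url", ""), ("severity", "high")] := rfl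

theorem pvFD_append (g : List String) (hg : g ≠ []) (line : String) :
    pvFD (g ++ [line]) =
      if PySem.Str.isIn "URL: " line then
        (pvFD g).insert "url" (PySem.List.pyGetD ((PySem.Str.split? line "URL: ").getD []) 1 "")
      else if PySem.Str.isIn "Context: " line then
        (pvFD g).insert "context" (PySem.List.pyGetD ((PySem.Str.split? line "Context: ").getD []) 1 "")
      else pvFD g := by
  obtain ⟨x, xs, rfl⟩ := List.exists_cons_of_ne_nil hg
  have hslice : ∀ (l : List String), PySem.List.slice l (some 1) none = l.drop 1 := by
    intro l; simpa using PySem.List.slice_from_natCast (a := 1) (xs := l)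
  simp only [pvFD, hslice, List.cons_append, List.drop_succ_cons, List.drop_zero,
    List.foldl_append, List.foldl_cons, List.foldl_nil, pvB_scan]
  split_ifs with h1 h2 <;> simp [PySem.Dict.insert, PySem.List.pyGetD]

-- the loop invariant: A's state is determined by B's groups
def pvInv (st : List (PySem.Dict String String) × Option (PySem.Dict String String))
    (gs : List (List String)) : Prop :=
  (∀ g ∈ gs, g ≠ []) ∧ st.1 = gs.dropLast.map pvFD ∧ st.2 = gs.getLast?.map pvFD

theorem pvInv_step (st : List (PySem.Dict String String) × Option (PySem.Dict String String))
    (gs : List (List String)) (line : String) (h : pvInv st gs) :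
    pvInv (pvA_line st line) (pvB_group gs line) := by
  obtain ⟨fs, cur⟩ := st
  obtain ⟨hne, h1, h2⟩ := h
  simp only at h1 h2
  subst h1; subst h2
  rcases gs.eq_nil_or_concat with rfl | ⟨gs', g, hcat⟩
  · by_cases hp : PySem.Str.isIn "Payload: " line <;> simp at hp
    · refine ⟨?_, ?_, ?_⟩ <;>
        simp [pvA_line, pvB_group, hp, pvFD_singleton]
    · refine ⟨?_, ?_, ?_⟩ <;>
        simp [pvA_line, pvB_group, hp]
  · simp only [List.concat_eq_append] at hcat
    subst hcat
    have hgne : g ≠ [] := hne g (by simp)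
    simp only [List.dropLast_concat, List.getLast?_concat, Option.map_some]
    by_cases hp : PySem.Str.isIn "Payload: " line <;> simp at hp
    · have hB : pvB_group (gs' ++ [g]) line = (gs' ++ [g]) ++ [[line]] := by
        simp [pvB_group, hp]
      rw [hB]
      refine ⟨?_, ?_, ?_⟩
      · intro g' hg'
        rcases List.mem_append.mp hg' with hg' | hg'
        · exact hne g' hg'
        · simp at hg'; subst hg'; simp
      · simp [pvA_line, hp]
      · simp [pvA_line, hp, pvFD_singleton]
    · have hB : pvB_group (gs' ++ [g]) line = gs' ++ [g ++ [line]] := by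
        simp [pvB_group, hp]
      rw [hB]
      have hA : pvA_line (gs'.map pvFD, some (pvFD g)) line
          = (gs'.map pvFD, some (pvFD (g ++ [line]))) := by
        rw [pvFD_append g hgne line]
        by_cases h1' : PySem.Str.isIn "URL: " line <;>
          by_cases h2' : PySem.Str.isIn "Context: " line <;>
            simp at h1' h2' <;>
              simp [pvA_line, hp, h1', h2']
      rw [hA]
      refine ⟨?_, ?_, ?_⟩
      · intro g' hg'
        rcases List.mem_append.mp hg' with hg' | hg'
        · exact hne g' (by simp [hg'])
        · simp at hg'; subst hg'; simp [hgne]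
      · simp
      · simp

theorem pvInv_foldl (L : List String)
    (st : List (PySem.Dict String String) × Option (PySem.Dict String String))
    (gs : List (List String)) (h : pvInv st gs) :
    pvInv (L.foldl pvA_line st) (L.foldl pvB_group gs) := by
  induction L generalizing st gs with
  | nil => exact h
  | cons l ls ih => exact ih _ _ (pvInv_step _ _ _ h)

-- ===== VERDICT (by name: the statement is the Claim_ definition above) =====
theorem parse_xsstrike_output_py_spec : Claim_equal_parse_xsstrike_output_py := by
  intro output _
  unfold Spec_parse_xsstrike_output_py parse_xsstrike_output_py parse_xsstrike_output_py_alt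
  have hstep : ((PySem.Str.split? output "\n").getD []).foldl pvA_step ([], none)
      = ((((PySem.Str.split? output "\n").getD []).map PySem.Str.strip).filter
          (fun l => l ≠ "")).foldl pvA_line ([], none) := by
    rw [← pv_foldl_strip_filter pvA_line]
    rfl
  set L := (((PySem.Str.split? output "\n").getD []).map PySem.Str.strip).filter
      (fun l => l ≠ "") with hL
  have hinv : pvInv (L.foldl pvA_line ([], none)) (L.foldl pvB_group []) :=
    pvInv_foldl L ([], none) [] ⟨by simp, by simp, by simp⟩
  set gs := L.foldl pvB_group [] with hgs
  obtain ⟨hne, h1, h2⟩ := hinv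
  rw [hstep]
  rcases gs.eq_nil_or_concat with hnil | ⟨gs', g, hcat⟩
  · rw [hnil] at h1 h2
    simp only [List.dropLast_nil, List.map_nil, List.getLast?_nil, Option.map_none] at h1 h2
    simp [h1, h2, ← hgs, hnil]
  · simp only [List.concat_eq_append] at hcat
    rw [hcat] at h1 h2
    simp only [List.dropLast_concat, List.getLast?_concat, Option.map_some] at h1 h2
    simp [h1, h2, ← hgs, hcat, pvFD_items]
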